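-- pv_equiv track=rewrite | github.com/kpc0810/LLaVA-NeXT | llava/eval/model_vqa_videomme.py | split_list_by_len
-- ===== SOURCE A (Python) =====
-- def split_list_by_len(lst, n):
--     # Initialize empty chunks and the total length for each chunk
--     chunks = [[] for _ in range(n)]
--     chunk_lengths = [0] * n  # Track total length for each chunk
--
--     # Sort the elements by length in descending order for a greedy allocation
--     sorted_lst = sorted(lst, key=len, reverse=True)
--
--     # Distribute elements greedily to the chunk with the least total length
--     for item in sorted_lst:
--         # Find the chunk with the smallest current length
--         min_index = chunk_lengths.index(min(chunk_lengths))
--         chunks[min_index].append(item)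
--         chunk_lengths[min_index] += len(item)
--
--     return chunks
-- ===== SOURCE B (Python) =====
-- def _insert_sorted(q, x):
--     # insert x into the ascending-sorted list q (before the first larger element)
--     for k in range(len(q)):
--         if x < q[k]:
--             return q[:k] + [x] + q[k:]
--     return q + [x]
--
-- def split_list_by_len(lst, n):
--     # Same greedy allocation, but the chunk loads are kept as a priority queue:
--     # an ascending-sorted list of (total_length, chunk_index) pairs, so the
--     # least-loaded chunk (smallest index on ties) is the queue head instead of
--     # a min-scan plus an index-scan over all chunk lengths on every item.
--     chunks = [[] for _ in range(n)]
--     queue = [(0, i) for i in range(n)]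
--     for item in sorted(lst, key=len, reverse=True):
--         total, i = queue[0]
--         chunks[i].append(item)
--         queue = _insert_sorted(queue[1:], (total + len(item), i))
--     return chunks
-- ===== Notes on version B (the rewrite author's own statement) =====
-- stated objective: alternative
-- what changed: B keeps the chunk loads as a priority queue (an ascending-sorted list of (total_length, chunk_index) pairs) whose head is always the least-loaded chunk, replacing A's per-item min-scan plus index-scan over the full length list.
import Mathlib
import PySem

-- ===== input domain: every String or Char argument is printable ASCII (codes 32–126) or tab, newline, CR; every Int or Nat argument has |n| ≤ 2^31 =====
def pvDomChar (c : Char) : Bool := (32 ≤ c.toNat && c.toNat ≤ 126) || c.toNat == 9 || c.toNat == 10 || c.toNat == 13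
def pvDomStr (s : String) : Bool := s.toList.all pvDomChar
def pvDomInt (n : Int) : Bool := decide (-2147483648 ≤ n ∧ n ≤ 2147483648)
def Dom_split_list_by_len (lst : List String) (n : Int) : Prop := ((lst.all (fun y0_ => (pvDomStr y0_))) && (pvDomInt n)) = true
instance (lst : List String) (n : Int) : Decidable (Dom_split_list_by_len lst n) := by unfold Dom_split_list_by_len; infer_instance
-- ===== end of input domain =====

-- B replaces A's per-item min+index scans by a sorted (total_length, chunk_index)
-- priority queue; return values proved equal on Pre_ (A raises outside it).

-- ===== PORT A =====
-- one loop iteration of A: find the least-loaded chunk by min then index, append there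
def aStep (item : String) (st : Option (List (List String) × List Int)) :
    Option (List (List String) × List Int) :=
  match st with
  | none => none
  | some (chunks, lens) =>
    match PySem.List.min? lens (fun x => x) with
    | none => none                                     -- min([]) raises ValueError
    | some m =>
      match PySem.List.index? lens m with
      | none => none
      | some idx =>
        some (chunks.modify idx (fun c => c ++ [item]),
              lens.modify idx (fun l => l + PySem.Str.len item))

def split_list_by_len (lst : List String) (n : Int) : List (List String) :=
  let chunks := (List.range n.toNat).map (fun _ => ([] : List String))
  let chunk_lengths : List Int := List.replicate n.toNat 0
  let sorted_lst := PySem.List.sorted lst (fun s => PySem.Str.len s) true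
  match sorted_lst.foldl (fun st item => aStep item st) (some (chunks, chunk_lengths)) with
  | none => []                                         -- unreachable under Pre_
  | some (chunks, _) => chunks

-- ===== PORT B =====
-- _insert_sorted: insert x before the first strictly larger (Python-lexicographic) pair
def insertSorted (q : List (Int × Int)) (x : Int × Int) : List (Int × Int) :=
  match q with
  | [] => [x]
  | y :: ys =>
    if x.1 < y.1 ∨ (x.1 = y.1 ∧ x.2 < y.2) then x :: y :: ys
    else y :: insertSorted ys x

-- one loop iteration of B: pop the queue head, append there, push the updated pair
def bStep (item : String) (st : Option (List (List String) × List (Int × Int))) :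
    Option (List (List String) × List (Int × Int)) :=
  match st with
  | none => none
  | some (chunks, queue) =>
    match queue with
    | [] => none                                       -- queue[0] raises IndexError
    | (total, i) :: rest =>
      -- i is a chunk index built from range(n): always ≥ 0, so .toNat is exact
      some (chunks.modify i.toNat (fun c => c ++ [item]),
            insertSorted rest (total + PySem.Str.len item, i))

def split_list_by_len_alt (lst : List String) (n : Int) : List (List String) :=
  let chunks := (List.range n.toNat).map (fun _ => ([] : List String))
  let queue := (List.range n.toNat).map (fun (i : Nat) => ((0 : Int), (i : Int)))
  match (PySem.List.sorted lst (fun s => PySem.Str.len s) true).foldl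
      (fun st item => bStep item st) (some (chunks, queue)) with
  | none => []                                         -- unreachable under Pre_
  | some (chunks, _) => chunks

-- ===== PRECONDITION & SPEC =====
-- Pre_ excludes exactly the inputs where A raises: with n ≤ 0 there are no chunks,
-- so min(chunk_lengths) raises ValueError as soon as lst is non-empty.
def Pre_split_list_by_len (lst : List String) (n : Int) : Prop := 1 ≤ n ∨ lst = []
instance (lst : List String) (n : Int) : Decidable (Pre_split_list_by_len lst n) := by
  unfold Pre_split_list_by_len; infer_instance

def pvWitness_split_list_by_len : List String × Int := (["abc", "d", "ef"], 2)

def Spec_split_list_by_len (lst : List String) (n : Int) (out : List (List String)) : Prop :=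
  out = split_list_by_len_alt lst n
instance (lst : List String) (n : Int) (out : List (List String)) :
    Decidable (Spec_split_list_by_len lst n out) := by
  unfold Spec_split_list_by_len; infer_instance

-- ===== CLAIM (what is proved, stated in full; the proofs are below) =====
def Claim_equal_split_list_by_len : Prop :=
  ∀ (lst : List String) (n : Int), Dom_split_list_by_len lst n →
    Pre_split_list_by_len lst n →
    Spec_split_list_by_len lst n (split_list_by_len lst n)

-- ===== LEMMAS AND PROOFS =====

-- the multiset B's queue represents: the (value, index) pairs of lens, indices from s
def pairs (s : Int) : List Int → List (Int × Int)
  | [] => []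
  | x :: xs => (x, s) :: pairs (s + 1) xs

-- Python's lexicographic < on int pairs
def lexLT (a b : Int × Int) : Prop := a.1 < b.1 ∨ (a.1 = b.1 ∧ a.2 < b.2)

-- B's loop invariant: the queue is the sorted rearrangement of the (length, index) pairs
def QueueInv (lens : List Int) (queue : List (Int × Int)) : Prop :=
  queue.Perm (pairs 0 lens) ∧ queue.Pairwise lexLT

-- the simulation relation between A's and B's loop states
def StRel : Option (List (List String) × List Int) →
    Option (List (List String) × List (Int × Int)) → Prop
  | none, none => True
  | some (c, lens), some (c', q) => c = c' ∧ QueueInv lens q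
  | _, _ => False

theorem lexLT_trans {a b c : Int × Int} (h1 : lexLT a b) (h2 : lexLT b c) : lexLT a c := by
  unfold lexLT at *; omega

theorem lexLT_of_not_of_ne_snd {a b : Int × Int} (h : ¬ lexLT a b) (hne : a.2 ≠ b.2) :
    lexLT b a := by
  unfold lexLT at *; omega

theorem pairs_eq_nil_iff {s : Int} {ls : List Int} : pairs s ls = [] ↔ ls = [] := by
  cases ls <;> simp [pairs]

theorem mem_pairs {p : Int × Int} : ∀ {ls : List Int} {s : Int},
    p ∈ pairs s ls ↔ ∃ (k : Nat) (h : k < ls.length), p = (ls[k], s + k) := by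
  intro ls
  induction ls with
  | nil => simp [pairs]
  | cons x xs ih =>
    intro s
    simp only [pairs, List.mem_cons, ih]
    constructor
    · rintro (rfl | ⟨k, hk, rfl⟩)
      · exact ⟨0, by simp, by simp⟩
      · refine ⟨k + 1, by simpa using hk, ?_⟩
        simp only [List.getElem_cons_succ, Prod.mk.injEq, true_and]
        push_cast; omega
    · rintro ⟨k, hk, rfl⟩
      cases k with
      | zero => left; simp
      | succ k =>
        right
        refine ⟨k, by simpa using hk, ?_⟩
        simp only [List.getElem_cons_succ, Prod.mk.injEq, true_and]
        push_cast; omega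

theorem pairs_snd_bounds {s : Int} {ls : List Int} {p : Int × Int} (h : p ∈ pairs s ls) :
    s ≤ p.2 ∧ p.2 < s + ls.length := by
  obtain ⟨k, hk, rfl⟩ := mem_pairs.mp h
  simp only []
  omega

theorem pairs_append (pre suf : List Int) : ∀ s : Int,
    pairs s (pre ++ suf) = pairs s pre ++ pairs (s + pre.length) suf := by
  induction pre with
  | nil => intro s; simp [pairs]
  | cons a t ih =>
    intro s
    simp only [List.cons_append, pairs, ih (s + 1), List.length_cons]
    have harith : s + 1 + (t.length : Int) = s + (((t.length : Nat) + 1 : Nat) : Int) := by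
      push_cast; omega
    rw [harith]

theorem modify_append_cons {α : Type} (pre : List α) (a : α) (suf : List α) (f : α → α) :
    (pre ++ a :: suf).modify pre.length f = pre ++ f a :: suf := by
  induction pre with
  | nil => simp
  | cons x t ih => simpa using ih

theorem pairs_decomp (lens : List Int) (k : Nat) (hk : k < lens.length) :
    pairs 0 lens =
      pairs 0 (lens.take k) ++ (lens[k], (k : Int)) :: pairs ((k : Int) + 1) (lens.drop (k + 1)) := by
  conv_lhs => rw [← List.take_append_drop k lens, List.drop_eq_getElem_cons hk]
  rw [pairs_append]
  simp [pairs, List.length_take, Nat.min_eq_left (Nat.le_of_lt hk)]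

theorem insertSorted_perm (x : Int × Int) : ∀ q : List (Int × Int),
    (insertSorted q x).Perm (x :: q) := by
  intro q
  induction q with
  | nil => simp [insertSorted]
  | cons y ys ih =>
    simp only [insertSorted]
    split
    · exact List.Perm.refl _
    · exact (ih.cons y).trans (List.Perm.swap x y ys)

theorem insertSorted_pairwise (x : Int × Int) : ∀ q : List (Int × Int),
    q.Pairwise lexLT → (∀ y ∈ q, y.2 ≠ x.2) → (insertSorted q x).Pairwise lexLT := by
  intro q
  induction q with
  | nil => intro _ _; simp [insertSorted]
  | cons y ys ih =>
    intro hq hsnd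
    obtain ⟨hy, hys⟩ := List.pairwise_cons.mp hq
    simp only [insertSorted]
    split
    · rename_i hlt
      refine List.pairwise_cons.mpr ⟨?_, hq⟩
      intro z hz
      rcases List.mem_cons.mp hz with rfl | hz
      · exact hlt
      · exact lexLT_trans hlt (hy z hz)
    · rename_i hnlt
      refine List.pairwise_cons.mpr ⟨?_, ih hys (fun z hz => hsnd z (List.mem_cons_of_mem _ hz))⟩
      intro z hz
      have hz' : z = x ∨ z ∈ ys := by
        have := (insertSorted_perm x ys).mem_iff.mp hz
        simpa using this
      rcases hz' with rfl | hz'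
      · exact lexLT_of_not_of_ne_snd hnlt (fun h => hsnd y List.mem_cons_self h.symm)
      · exact hy z hz'

-- the queue head dominates every (length, index) pair of lens
theorem head_least {lens : List Int} {l i : Int} {rest : List (Int × Int)}
    (hInv : QueueInv lens ((l, i) :: rest)) :
    ∀ p ∈ pairs 0 lens, p = (l, i) ∨ lexLT (l, i) p := by
  intro p hp
  have hp' : p ∈ (l, i) :: rest := hInv.1.mem_iff.mpr hp
  rcases List.mem_cons.mp hp' with rfl | hp''
  · exact Or.inl rfl
  · exact Or.inr ((List.pairwise_cons.mp hInv.2).1 p hp'')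

-- the queue head is (lens[k], k) for some valid index k
theorem head_mem {lens : List Int} {l i : Int} {rest : List (Int × Int)}
    (hInv : QueueInv lens ((l, i) :: rest)) :
    ∃ (k : Nat) (h : k < lens.length), i = (k : Int) ∧ lens[k] = l := by
  have hmem : (l, i) ∈ pairs 0 lens := hInv.1.mem_iff.mp List.mem_cons_self
  obtain ⟨k, hk, heq⟩ := mem_pairs.mp hmem
  rw [Prod.mk.injEq] at heq
  exact ⟨k, hk, by omega, by omega⟩

-- A's min(chunk_lengths) returns exactly the queue head's length
theorem head_min {lens : List Int} {l i : Int} {rest : List (Int × Int)}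
    (hInv : QueueInv lens ((l, i) :: rest)) :
    PySem.List.min? lens (fun x => x) = some l := by
  obtain ⟨k, hk, hik, hlk⟩ := head_mem hInv
  have hl : l ∈ lens := by rw [← hlk]; exact List.getElem_mem hk
  cases hmin : PySem.List.min? lens (fun x => x) with
  | none =>
    rw [PySem.List.min?_eq_none_iff] at hmin
    subst hmin; simp at hk
  | some m =>
    have hml : m ≤ l := PySem.List.min?_isMin hmin l hl
    have hm : m ∈ lens := PySem.List.min?_mem hmin
    obtain ⟨k', hk', hmk'⟩ := List.getElem_of_mem hm
    have hmem : (m, (k' : Int)) ∈ pairs 0 lens := by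
      rw [mem_pairs]; exact ⟨k', hk', by simp [hmk']⟩
    have hlm : l ≤ m := by
      rcases head_least hInv _ hmem with heq | hlt
      · rw [Prod.mk.injEq] at heq; omega
      · simp [lexLT] at hlt; omega
    have hml' : m = l := by omega
    rw [hml']

-- A's chunk_lengths.index(min) returns exactly the queue head's index
theorem head_index {lens : List Int} {l i : Int} {rest : List (Int × Int)} {k : Nat}
    (hInv : QueueInv lens ((l, i) :: rest))
    (hik : i = (k : Int)) (hk : k < lens.length) (hlk : lens[k] = l) :
    PySem.List.index? lens l = some k := by
  rw [PySem.List.index?_eq_some_iff]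
  refine ⟨lens.take k, lens.drop (k + 1), ?_, ?_, ?_⟩
  · conv_lhs => rw [← List.take_append_drop k lens, List.drop_eq_getElem_cons hk]
    rw [hlk]
  · simp [List.length_take, Nat.min_eq_left (Nat.le_of_lt hk)]
  · intro hmem
    obtain ⟨j, hj, hjl⟩ := List.getElem_of_mem hmem
    have hjk : j < k := by
      simp only [List.length_take] at hj; omega
    have hjl' : lens[j]'(by omega) = l := by
      rw [← hjl]; exact (List.getElem_take).symm
    have hmem' : (l, (j : Int)) ∈ pairs 0 lens := by
      rw [mem_pairs]; exact ⟨j, by omega, by simp [hjl']⟩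
    rcases head_least hInv _ hmem' with heq | hlt
    · rw [Prod.mk.injEq] at heq; omega
    · simp [lexLT, hik] at hlt; omega

-- the queue invariant is preserved across one greedy allocation
theorem inv_step {lens : List Int} {l i : Int} {rest : List (Int × Int)} {k : Nat} (d : Int)
    (hInv : QueueInv lens ((l, i) :: rest))
    (hik : i = (k : Int)) (hk : k < lens.length) (hlk : lens[k] = l) :
    QueueInv (lens.modify k (fun x => x + d)) (insertSorted rest (l + d, i)) := by
  have hlenpre : (lens.take k).length = k := by
    simp [List.length_take, Nat.min_eq_left (Nat.le_of_lt hk)]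
  have hdecomp : lens = lens.take k ++ l :: lens.drop (k + 1) := by
    conv_lhs => rw [← List.take_append_drop k lens, List.drop_eq_getElem_cons hk]
    rw [hlk]
  have hmod : lens.modify k (fun x => x + d) =
      lens.take k ++ (l + d) :: lens.drop (k + 1) := by
    have h0 := modify_append_cons (lens.take k) l (lens.drop (k + 1)) (fun x => x + d)
    rw [hlenpre] at h0
    conv_lhs at h0 => rw [← hdecomp]
    exact h0
  have hP : pairs 0 lens =
      pairs 0 (lens.take k) ++ (l, i) :: pairs ((k : Int) + 1) (lens.drop (k + 1)) := by
    rw [pairs_decomp lens k hk, hlk, hik]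
  have hP' : pairs 0 (lens.modify k (fun x => x + d)) =
      pairs 0 (lens.take k) ++ (l + d, i) :: pairs ((k : Int) + 1) (lens.drop (k + 1)) := by
    rw [hmod, pairs_append]
    simp [pairs, hlenpre, hik]
  have hrest : rest.Perm (pairs 0 (lens.take k) ++ pairs ((k : Int) + 1) (lens.drop (k + 1))) := by
    have h1 : ((l, i) :: rest).Perm
        ((l, i) :: (pairs 0 (lens.take k) ++ pairs ((k : Int) + 1) (lens.drop (k + 1)))) :=
      (hInv.1.trans (by rw [hP])).trans List.perm_middle
    exact h1.cons_inv
  constructor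
  · refine (insertSorted_perm _ _).trans ?_
    rw [hP']
    exact (hrest.cons _).trans List.perm_middle.symm
  · refine insertSorted_pairwise _ _ (List.pairwise_cons.mp hInv.2).2 ?_
    intro y hy
    rcases List.mem_append.mp (hrest.mem_iff.mp hy) with h | h
    · have hb := pairs_snd_bounds h
      rw [hlenpre] at hb
      simp only [hik]
      omega
    · have hb := pairs_snd_bounds h
      simp only [hik]
      omega

-- one loop iteration preserves the simulation relation
theorem stRel_step (item : String) (sa : Option (List (List String) × List Int))
    (sb : Option (List (List String) × List (Int × Int))) (h : StRel sa sb) :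
    StRel (aStep item sa) (bStep item sb) := by
  match sa, sb with
  | none, none => simp [aStep, bStep, StRel]
  | none, some _ => exact absurd h (by simp [StRel])
  | some _, none => exact absurd h (by simp [StRel])
  | some (c, lens), some (c', q) =>
    obtain ⟨rfl, hInv⟩ := h
    match q with
    | [] =>
      have hlens : lens = [] := by
        rw [← pairs_eq_nil_iff (s := 0), ← hInv.1.nil_eq]
      subst hlens
      have hmin : PySem.List.min? ([] : List Int) (fun x => x) = none := by
        rw [PySem.List.min?_eq_none_iff]
      simp [aStep, bStep, hmin, StRel]
    | (l, i) :: rest =>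
      obtain ⟨k, hk, hik, hlk⟩ := head_mem hInv
      have hmin := head_min hInv
      have hidx := head_index hInv hik hk hlk
      have hit : i.toNat = k := by simp [hik]
      simp only [aStep, bStep, hmin, hidx, hit]
      exact ⟨rfl, inv_step _ hInv hik hk hlk⟩

-- the relation holds along the whole fold
theorem foldl_rel (items : List String) : ∀ sa sb, StRel sa sb →
    StRel (items.foldl (fun st item => aStep item st) sa)
          (items.foldl (fun st item => bStep item st) sb) := by
  induction items with
  | nil => intro sa sb h; simpa using h
  | cons it ts ih =>
    intro sa sb h
    simp only [List.foldl_cons]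
    exact ih _ _ (stRel_step it sa sb h)

theorem pairs_length (ls : List Int) : ∀ s : Int, (pairs s ls).length = ls.length := by
  induction ls with
  | nil => intro s; rfl
  | cons x xs ih => intro s; simp [pairs, ih]

theorem pairs_getElem (ls : List Int) : ∀ (s : Int) (j : Nat) (h : j < ls.length),
    (pairs s ls)[j]'(by rw [pairs_length]; exact h) = (ls[j], s + (j : Int)) := by
  induction ls with
  | nil => intro s j h; simp at h
  | cons x xs ih =>
    intro s j h
    cases j with
    | zero => simp [pairs]
    | succ j =>
      have hj : j < xs.length := by simpa using h
      show (pairs (s + 1) xs)[j]'(by rw [pairs_length]; exact hj) = _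
      rw [ih (s + 1) j hj]
      simp only [List.getElem_cons_succ, Prod.mk.injEq, true_and]
      push_cast; omega

-- the initial states are related
theorem inv_init (m : Nat) :
    QueueInv (List.replicate m 0) ((List.range m).map (fun (i : Nat) => ((0 : Int), (i : Int)))) := by
  constructor
  · have heq : (List.range m).map (fun (i : Nat) => ((0 : Int), (i : Int))) =
        pairs 0 (List.replicate m 0) := by
      apply List.ext_getElem
      · simp [pairs_length]
      · intro j h1 h2
        have hj : j < (List.replicate m (0 : Int)).length := by
          rw [← pairs_length (List.replicate m 0) 0]; exact h2
        have hp := pairs_getElem (List.replicate m 0) 0 j hj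
        simp only [List.getElem_map, List.getElem_range]
        rw [hp]
        simp
    rw [heq]
  · exact List.Pairwise.map _
      (fun a b hab => Or.inr ⟨rfl, by show (a : Int) < (b : Int); exact_mod_cast hab⟩)
      List.pairwise_lt_range

-- ===== VERDICT (by name: the statement is the Claim_ definition above) =====
theorem split_list_by_len_spec : Claim_equal_split_list_by_len := by
  intro lst n _ _
  show split_list_by_len lst n = split_list_by_len_alt lst n
  have h := foldl_rel (PySem.List.sorted lst (fun s => PySem.Str.len s) true)
      (some ((List.range n.toNat).map (fun _ => ([] : List String)),
             List.replicate n.toNat (0 : Int)))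
      (some ((List.range n.toNat).map (fun _ => ([] : List String)),
             (List.range n.toNat).map (fun (i : Nat) => ((0 : Int), (i : Int)))))
      ⟨rfl, inv_init n.toNat⟩
  unfold split_list_by_len split_list_by_len_alt
  dsimp only
  revert h
  cases List.foldl (fun st item => aStep item st)
      (some ((List.range n.toNat).map (fun _ => ([] : List String)),
             List.replicate n.toNat (0 : Int)))
      (PySem.List.sorted lst (fun s => PySem.Str.len s) true) with
  | none =>
    cases List.foldl (fun st item => bStep item st)
        (some ((List.range n.toNat).map (fun _ => ([] : List String)),
               (List.range n.toNat).map (fun (i : Nat) => ((0 : Int), (i : Int)))))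
        (PySem.List.sorted lst (fun s => PySem.Str.len s) true) with
    | none => intro _; rfl
    | some pb => intro h; exact absurd h (by simp [StRel])
  | some pa =>
    cases List.foldl (fun st item => bStep item st)
        (some ((List.range n.toNat).map (fun _ => ([] : List String)),
               (List.range n.toNat).map (fun (i : Nat) => ((0 : Int), (i : Int)))))
        (PySem.List.sorted lst (fun s => PySem.Str.len s) true) with
    | none => intro h; exact absurd h (by simp [StRel])
    | some pb =>
      intro h
      obtain ⟨ca, la⟩ := pa
      obtain ⟨cb, qb⟩ := pb
      exact h.1
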